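-- pv_equiv track=rewrite | github.com/cvr-bhupalreddy/dsa-python-2025 | DSA/Graphs/Tuf_Problems/5.MinDistance_1.py | nearest_one_distance
-- ===== SOURCE A (Python) =====
-- from collections import deque
--
-- def nearest_one_distance(grid):
--     n, m = len(grid), len(grid[0])
--     dist = [[-1] * m for _ in range(n)]
--     queue = deque()
--
--     # Step 1: Push all 1s into queue
--     for i in range(n):
--         for j in range(m):
--             if grid[i][j] == 1:
--                 dist[i][j] = 0
--                 queue.append((i, j))
--
--     directions = [
--         (-1, 0),  # up
--         (1, 0),  # down
--         (0, -1),  # left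
--         (0, 1)  # right
--     ]
--
--     # Step 2: BFS
--     while queue:
--         r, c = queue.popleft()
--         for dr, dc in directions:
--             nr, nc = r + dr, c + dc
--             if 0 <= nr < n and 0 <= nc < m:
--                 if dist[nr][nc] == -1:
--                     dist[nr][nc] = dist[r][c] + 1
--                     queue.append((nr, nc))
--
--     return dist
-- ===== SOURCE B (Python) =====
-- def nearest_one_distance(grid):
--     n, m = len(grid), len(grid[0])
--     ones = [(i, j) for i in range(n) for j in range(m) if grid[i][j] == 1]
--     if not ones:
--         return [[-1] * m for _ in range(n)]
--     return [[min(abs(i - a) + abs(j - b) for a, b in ones) for j in range(m)]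
--             for i in range(n)]
-- ===== Notes on version B (the rewrite author's own statement) =====
-- stated objective: simpler
-- what changed: Replaces the multi-source BFS with a queue and in-place relaxation by a direct closed-form computation: each cell's value is the minimum Manhattan distance to any 1-cell (all -1 when there are no 1s), which is exactly what BFS on an obstacle-free grid computes.
import Mathlib
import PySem

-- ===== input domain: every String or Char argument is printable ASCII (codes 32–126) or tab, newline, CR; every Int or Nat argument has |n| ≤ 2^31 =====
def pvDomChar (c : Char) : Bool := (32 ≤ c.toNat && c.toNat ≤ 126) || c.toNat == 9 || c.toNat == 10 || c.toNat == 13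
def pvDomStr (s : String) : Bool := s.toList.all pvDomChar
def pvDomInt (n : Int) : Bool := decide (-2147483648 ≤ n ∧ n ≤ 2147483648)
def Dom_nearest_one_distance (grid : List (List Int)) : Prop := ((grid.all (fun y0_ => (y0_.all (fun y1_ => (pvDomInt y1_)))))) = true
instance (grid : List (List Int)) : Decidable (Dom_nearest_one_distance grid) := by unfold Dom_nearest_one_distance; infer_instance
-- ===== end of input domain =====

-- B replaces A's multi-source BFS (queue + in-place relaxation) by the closed form
-- "minimum Manhattan distance to any 1-cell" (all -1 when there are no 1s); objective: simpler.

-- ===== PORT A =====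
-- 2D read grid[i][j] / write dist[i][j] = v; every use below is guarded in range
-- (Pre_ admits only grids whose rows are at least as long as row 0), so the getD
-- defaults are never observed on admitted inputs.
def pvGet2 (xs : List (List Int)) (i j : Nat) : Int := (xs.getD i []).getD j 0
def pvSet2 (xs : List (List Int)) (i j : Nat) (v : Int) : List (List Int) :=
  xs.set i ((xs.getD i []).set j v)

def pvDirs : List (Int × Int) := [(-1,0),(1,0),(0,-1),(0,1)]

-- body of A's inner `for dr, dc in directions` loop
def pvRelax (n m : Nat) (rc : Nat × Nat) (st : List (List Int) × List (Nat × Nat)) (d : Int × Int) :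
    List (List Int) × List (Nat × Nat) :=
  let nr : Int := (rc.1 : Int) + d.1
  let nc : Int := (rc.2 : Int) + d.2
  if 0 ≤ nr ∧ nr < (n : Int) ∧ 0 ≤ nc ∧ nc < (m : Int) then
    if pvGet2 st.1 nr.toNat nc.toNat = -1 then
      (pvSet2 st.1 nr.toNat nc.toNat (pvGet2 st.1 rc.1 rc.2 + 1), st.2 ++ [(nr.toNat, nc.toNat)])
    else st
  else st

-- A's `while queue:` loop; the fuel only makes the recursion structural: the supplied
-- fuel (each cell is enqueued at most once, thanks to the dist[nr][nc] == -1 guard,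
-- so the loop pops at most st.2.length + n*m times) is never exhausted first
def pvBfs (n m : Nat) : Nat → List (List Int) × List (Nat × Nat) → List (List Int)
  | 0, st => st.1
  | fuel+1, st =>
    match st.2 with
    | [] => st.1
    | rc :: rest => pvBfs n m fuel (pvDirs.foldl (pvRelax n m rc) (st.1, rest))

-- A's Step 1: push all 1s, set their dist to 0
def pvInit (grid : List (List Int)) (n m : Nat) : List (List Int) × List (Nat × Nat) :=
  (List.range n).foldl (fun st i =>
    (List.range m).foldl (fun st j =>
      if pvGet2 grid i j = 1 then (pvSet2 st.1 i j 0, st.2 ++ [(i, j)]) else st) st)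
    (List.replicate n (List.replicate m (-1)), [])

def nearest_one_distance (grid : List (List Int)) : List (List Int) :=
  let n := grid.length
  let m := grid.headI.length
  let st := pvInit grid n m
  pvBfs n m (st.2.length + 2 * (n * m) + 1) st

-- ===== PORT B =====
-- abs(i - a) + abs(j - b)
def pvMan (i j : Nat) (q : Nat × Nat) : Int :=
  (((i : Int) - q.1).natAbs : Int) + (((j : Int) - q.2).natAbs : Int)

-- the comprehension [(i, j) for i in range(n) for j in range(m) if grid[i][j] == 1]
def pvOnes (grid : List (List Int)) (n m : Nat) : List (Nat × Nat) :=
  (List.range n).flatMap (fun i => (List.range m).filterMap (fun j =>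
    if pvGet2 grid i j = 1 then some (i, j) else none))

-- Python's min over the nonempty list p :: ps of 1-cells
def pvDf (p : Nat × Nat) (ps : List (Nat × Nat)) (i j : Nat) : Int :=
  ps.foldl (fun acc q => min acc (pvMan i j q)) (pvMan i j p)

def nearest_one_distance_alt (grid : List (List Int)) : List (List Int) :=
  let n := grid.length
  let m := grid.headI.length
  match pvOnes grid n m with
  | [] => List.replicate n (List.replicate m (-1))
  | p :: ps =>
    (List.range n).map (fun i => (List.range m).map (fun j => pvDf p ps i j))

-- ===== PRECONDITION & SPEC =====
-- Pre_ excludes exactly the inputs where Python A raises IndexError: the empty grid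
-- (grid[0]) and ragged grids with some row shorter than row 0 (grid[i][j], j < m).
def Pre_nearest_one_distance (grid : List (List Int)) : Prop :=
  grid ≠ [] ∧ ∀ row ∈ grid, grid.headI.length ≤ row.length
instance (grid : List (List Int)) : Decidable (Pre_nearest_one_distance grid) := by
  unfold Pre_nearest_one_distance; infer_instance

def pvWitness_nearest_one_distance : List (List Int) := [[1, 0], [0, 0]]

def Spec_nearest_one_distance (grid : List (List Int)) (out : List (List Int)) : Prop := out = nearest_one_distance_alt grid
instance (grid : List (List Int)) (out : List (List Int)) : Decidable (Spec_nearest_one_distance grid out) := by unfold Spec_nearest_one_distance; infer_instance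

-- ===== CLAIM (what is proved, stated in full; the proofs are below) =====
def Claim_equal_nearest_one_distance : Prop := ∀ (grid : List (List Int)), Dom_nearest_one_distance grid → Pre_nearest_one_distance grid → Spec_nearest_one_distance grid (nearest_one_distance grid)

-- ===== LEMMAS AND PROOFS =====

def pvDims (n m : Nat) (xs : List (List Int)) : Prop :=
  xs.length = n ∧ ∀ k, k < n → (xs.getD k []).length = m
def pvUnset (xs : List (List Int)) : Nat :=
  (xs.map (fun row => row.countP (fun v => v == -1))).sum

lemma pvLGetD_set_self {α : Type} (l : List α) (i : Nat) (d x : α) (h : i < l.length) :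
    (l.set i x).getD i d = x := by
  simp [List.getD, List.getElem?_set_self h]

lemma pvLGetD_set_ne {α : Type} (l : List α) (i j : Nat) (d x : α) (h : i ≠ j) :
    (l.set i x).getD j d = l.getD j d := by
  simp [List.getD, List.getElem?_set_ne h]

lemma pvLGetD_set_ge {α : Type} (l : List α) (i : Nat) (x : α) (h : l.length ≤ i) :
    l.set i x = l := List.set_eq_of_length_le h

lemma pvGet2_set2_self (n m : Nat) (xs : List (List Int)) (i j : Nat) (v : Int)
    (hd : pvDims n m xs) (hi : i < n) (hj : j < m) : pvGet2 (pvSet2 xs i j v) i j = v := by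
  obtain ⟨hl, hr⟩ := hd
  have hil : i < xs.length := by omega
  have hjl : j < (xs.getD i []).length := by rw [hr i hi]; exact hj
  unfold pvGet2 pvSet2
  rw [pvLGetD_set_self _ _ _ _ hil, pvLGetD_set_self _ _ _ _ hjl]

lemma pvGet2_set2_ne (xs : List (List Int)) (i j a b : Nat) (v : Int)
    (h : (a, b) ≠ (i, j)) : pvGet2 (pvSet2 xs i j v) a b = pvGet2 xs a b := by
  unfold pvGet2 pvSet2
  by_cases hai : a = i
  · subst hai
    have hbj : b ≠ j := by intro hb; exact h (by rw [hb])
    by_cases hil : a < xs.length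
    · rw [pvLGetD_set_self _ _ _ _ hil, pvLGetD_set_ne _ _ _ _ _ (fun hh => hbj hh.symm)]
    · rw [pvLGetD_set_ge _ _ _ (by omega)]
  · rw [pvLGetD_set_ne _ _ _ _ _ (fun hh => hai hh.symm)]

lemma pvDims_set2 (n m : Nat) (xs : List (List Int)) (i j : Nat) (v : Int)
    (hd : pvDims n m xs) : pvDims n m (pvSet2 xs i j v) := by
  obtain ⟨hl, hr⟩ := hd
  refine ⟨by simp [pvSet2, hl], ?_⟩
  intro k hk
  by_cases hki : k = i
  · subst hki
    by_cases hil : k < xs.length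
    · rw [pvSet2, pvLGetD_set_self _ _ _ _ hil, List.length_set]
      exact hr k hk
    · rw [pvSet2, pvLGetD_set_ge _ _ _ (by omega)]; exact hr k hk
  · rw [pvSet2, pvLGetD_set_ne _ _ _ _ _ (fun hh => hki hh.symm)]; exact hr k hk

lemma pvCountP_set (p : Int → Bool) : ∀ (l : List Int) (j : Nat) (v : Int), j < l.length →
    (l.set j v).countP p + (if p (l.getD j 0) then 1 else 0) =
      l.countP p + (if p v then 1 else 0) := by
  intro l
  induction l with
  | nil => intro j v h; simp at h
  | cons x xs ih =>
    intro j v h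
    cases j with
    | zero => simp [List.countP_cons]; omega
    | succ k =>
      have := ih k v (by simpa using h)
      simp only [List.set_cons_succ, List.countP_cons, List.getD_cons_succ]
      omega

lemma pvSumMap_set (f : List Int → Nat) : ∀ (xs : List (List Int)) (i : Nat) (row : List Int),
    i < xs.length →
    ((xs.set i row).map f).sum + f (xs.getD i []) = (xs.map f).sum + f row := by
  intro xs
  induction xs with
  | nil => intro i row h; simp at h
  | cons x l ih =>
    intro i row h
    cases i with
    | zero => simp; omega
    | succ k =>
      have := ih k row (by simpa using h)
      simp only [List.set_cons_succ, List.map_cons, List.sum_cons, List.getD_cons_succ]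
      omega

lemma pvUnset_set2_lt (n m : Nat) (xs : List (List Int)) (i j : Nat) (v : Int)
    (hd : pvDims n m xs) (hi : i < n) (hj : j < m)
    (ho : pvGet2 xs i j = -1) (hv : v ≠ -1) :
    pvUnset (pvSet2 xs i j v) < pvUnset xs := by
  obtain ⟨hl, hr⟩ := hd
  have hil : i < xs.length := by omega
  have hjl : j < (xs.getD i []).length := by rw [hr i hi]; exact hj
  have hrow := pvCountP_set (fun v => v == -1) (xs.getD i []) j v hjl
  rw [show (xs.getD i []).getD j 0 = -1 from ho] at hrow
  simp only [hv, beq_iff_eq, if_true, if_false, beq_self_eq_true] at hrow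
  have hsum := pvSumMap_set (fun row => row.countP (fun v => v == -1)) xs i
    ((xs.getD i []).set j v) hil
  unfold pvUnset pvSet2
  simp only [beq_iff_eq] at hsum hrow ⊢
  omega

lemma pvUnset_le (n m : Nat) (xs : List (List Int)) (hd : pvDims n m xs) :
    pvUnset xs ≤ n * m := by
  obtain ⟨hl, hr⟩ := hd
  calc pvUnset xs ≤ (xs.map (fun _ => m)).sum := by
        apply List.sum_le_sum
        intro row hrow
        obtain ⟨k, hk, hke⟩ := List.mem_iff_getElem.mp hrow
        have hrl : row.length = m := by
          have h2 := hr k (by omega)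
          rw [List.getD, List.getElem?_eq_getElem hk] at h2
          simpa [← hke] using h2
        calc row.countP _ ≤ row.length := List.countP_le_length
          _ = m := hrl
    _ = n * m := by simp [List.map_const', List.sum_replicate, smul_eq_mul, hl]

def pvTgt (n m : Nat) (rc : Nat × Nat) (d : Int × Int) : Option (Nat × Nat) :=
  let nr : Int := (rc.1 : Int) + d.1
  let nc : Int := (rc.2 : Int) + d.2
  if 0 ≤ nr ∧ nr < (n : Int) ∧ 0 ≤ nc ∧ nc < (m : Int) then some (nr.toNat, nc.toNat) else none
def pvNbrs (n m : Nat) (rc : Nat × Nat) : List (Nat × Nat) := pvDirs.filterMap (pvTgt n m rc)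

lemma pvFoldlMin_le_init (f : Nat × Nat → Int) : ∀ (l : List (Nat × Nat)) (a : Int),
    l.foldl (fun acc q => min acc (f q)) a ≤ a := by
  intro l
  induction l with
  | nil => intro a; simp
  | cons x xs ih =>
    intro a
    calc xs.foldl (fun acc q => min acc (f q)) (min a (f x)) ≤ min a (f x) := ih _
      _ ≤ a := min_le_left _ _

lemma pvFoldlMin_le_mem (f : Nat × Nat → Int) : ∀ (l : List (Nat × Nat)) (a : Int) (q : Nat × Nat),
    q ∈ l → l.foldl (fun acc q => min acc (f q)) a ≤ f q := by
  intro l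
  induction l with
  | nil => intro a q h; simp at h
  | cons x xs ih =>
    intro a q h
    rcases List.mem_cons.mp h with rfl | h
    · calc xs.foldl (fun acc q => min acc (f q)) (min a (f q)) ≤ min a (f q) :=
        pvFoldlMin_le_init f xs _
        _ ≤ f q := min_le_right _ _
    · exact ih _ q h

lemma pvFoldlMin_attain (f : Nat × Nat → Int) : ∀ (l : List (Nat × Nat)) (a : Int),
    l.foldl (fun acc q => min acc (f q)) a = a ∨
      ∃ q ∈ l, l.foldl (fun acc q => min acc (f q)) a = f q := by
  intro l
  induction l with
  | nil => intro a; simp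
  | cons x xs ih =>
    intro a
    rcases ih (min a (f x)) with h | ⟨q, hq, he⟩
    · simp only [List.foldl_cons]
      rcases min_cases a (f x) with ⟨hm, _⟩ | ⟨hm, _⟩
      · left; rw [h, hm]
      · right; exact ⟨x, List.mem_cons_self, by rw [h, hm]⟩
    · right; exact ⟨q, List.mem_cons_of_mem _ hq, he⟩

lemma pvDf_le (p : Nat × Nat) (ps : List (Nat × Nat)) (i j : Nat) (q : Nat × Nat)
    (h : q ∈ p :: ps) : pvDf p ps i j ≤ pvMan i j q := by
  unfold pvDf
  rcases List.mem_cons.mp h with h | h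
  · subst h; exact pvFoldlMin_le_init _ _ _
  · exact pvFoldlMin_le_mem _ _ _ _ h

lemma pvDf_attain (p : Nat × Nat) (ps : List (Nat × Nat)) (i j : Nat) :
    ∃ q ∈ p :: ps, pvDf p ps i j = pvMan i j q := by
  rcases pvFoldlMin_attain (pvMan i j) ps (pvMan i j p) with h | ⟨q, hq, he⟩
  · exact ⟨p, List.mem_cons_self, h⟩
  · exact ⟨q, List.mem_cons_of_mem _ hq, he⟩

lemma pvMan_nonneg (i j : Nat) (q : Nat × Nat) : 0 ≤ pvMan i j q := by
  unfold pvMan; positivity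

lemma pvDf_nonneg (p : Nat × Nat) (ps : List (Nat × Nat)) (i j : Nat) : 0 ≤ pvDf p ps i j := by
  obtain ⟨q, _, he⟩ := pvDf_attain p ps i j
  rw [he]; exact pvMan_nonneg i j q

lemma pvMan_self (i j : Nat) : pvMan i j (i, j) = 0 := by simp [pvMan]

lemma pvMan_eq_zero (i j : Nat) (q : Nat × Nat) (h : pvMan i j q = 0) : q = (i, j) := by
  unfold pvMan at h
  have h1 : ((i : Int) - q.1).natAbs = 0 ∧ ((j : Int) - q.2).natAbs = 0 := by omega
  obtain ⟨a, b⟩ := q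
  simp only at h1
  have : (a : Int) = i ∧ (b : Int) = j := by omega
  simp only [Prod.mk.injEq]
  omega

-- membership characterization of in-range neighbours
lemma pvMem_nbrs (n m : Nat) (rc uv : Nat × Nat) :
    uv ∈ pvNbrs n m rc ↔ uv.1 < n ∧ uv.2 < m ∧ pvMan rc.1 rc.2 uv = 1 := by
  obtain ⟨r, c⟩ := rc
  obtain ⟨a, b⟩ := uv
  rw [pvNbrs, List.mem_filterMap]
  constructor
  · intro ⟨d, hd, ht⟩
    have hd' : d = ((-1 : Int), (0 : Int)) ∨ d = (1, 0) ∨ d = (0, -1) ∨ d = (0, 1) := by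
      simpa [pvDirs] using hd
    rcases hd' with rfl | rfl | rfl | rfl <;>
    · rw [pvTgt] at ht
      split_ifs at ht with hc
      simp only [Option.some.injEq, Prod.mk.injEq] at ht
      obtain ⟨h1, h2⟩ := ht
      simp only at hc
      simp only [pvMan]
      omega
  · intro ⟨ha, hb, hman⟩
    simp only [pvMan] at hman
    rcases show ((a : Int) = (r : Int) - 1 ∧ b = c) ∨ ((a : Int) = (r : Int) + 1 ∧ b = c) ∨
        (a = r ∧ (b : Int) = (c : Int) - 1) ∨ (a = r ∧ (b : Int) = (c : Int) + 1) by omega with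
      ⟨h1, h2⟩ | ⟨h1, h2⟩ | ⟨h1, h2⟩ | ⟨h1, h2⟩
    · refine ⟨((-1 : Int), (0 : Int)), by simp [pvDirs], ?_⟩
      rw [pvTgt]
      rw [if_pos (by simp only; omega)]
      simp only [Option.some.injEq, Prod.mk.injEq]
      omega
    · refine ⟨((1 : Int), (0 : Int)), by simp [pvDirs], ?_⟩
      rw [pvTgt]
      rw [if_pos (by simp only; omega)]
      simp only [Option.some.injEq, Prod.mk.injEq]
      omega
    · refine ⟨((0 : Int), (-1 : Int)), by simp [pvDirs], ?_⟩
      rw [pvTgt]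
      rw [if_pos (by simp only; omega)]
      simp only [Option.some.injEq, Prod.mk.injEq]
      omega
    · refine ⟨((0 : Int), (1 : Int)), by simp [pvDirs], ?_⟩
      rw [pvTgt]
      rw [if_pos (by simp only; omega)]
      simp only [Option.some.injEq, Prod.mk.injEq]
      omega

lemma pvMem_ones (grid : List (List Int)) (n m a b : Nat) :
    (a, b) ∈ pvOnes grid n m ↔ a < n ∧ b < m ∧ pvGet2 grid a b = 1 := by
  simp only [pvOnes, List.mem_flatMap, List.mem_filterMap, List.mem_range]
  constructor
  · intro ⟨i, hi, j, hj, he⟩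
    split_ifs at he with hc
    · simp only [Option.some.injEq, Prod.mk.injEq] at he
      obtain ⟨rfl, rfl⟩ := he
      exact ⟨hi, hj, hc⟩
  · intro ⟨ha, hb, hc⟩
    exact ⟨a, ha, b, hb, by rw [if_pos hc]⟩

lemma pvMan_step (i j : Nat) (uv q : Nat × Nat) (hadj : pvMan i j uv = 1) :
    pvMan uv.1 uv.2 q ≤ pvMan i j q + 1 := by
  unfold pvMan at *
  omega

lemma pvDf_lip (n m : Nat) (p : Nat × Nat) (ps : List (Nat × Nat)) (rc uv : Nat × Nat)
    (h : uv ∈ pvNbrs n m rc) :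
    pvDf p ps uv.1 uv.2 ≤ pvDf p ps rc.1 rc.2 + 1 := by
  obtain ⟨q, hq, he⟩ := pvDf_attain p ps rc.1 rc.2
  have hadj := ((pvMem_nbrs n m rc uv).mp h).2.2
  calc pvDf p ps uv.1 uv.2 ≤ pvMan uv.1 uv.2 q := pvDf_le p ps uv.1 uv.2 q hq
    _ ≤ pvMan rc.1 rc.2 q + 1 := pvMan_step rc.1 rc.2 uv q hadj
    _ = pvDf p ps rc.1 rc.2 + 1 := by rw [he]

lemma pvNbrs_symm (n m : Nat) (rc uv : Nat × Nat) (h : uv ∈ pvNbrs n m rc)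
    (h1 : rc.1 < n) (h2 : rc.2 < m) : rc ∈ pvNbrs n m uv := by
  rw [pvMem_nbrs] at h ⊢
  refine ⟨h1, h2, ?_⟩
  have := h.2.2
  unfold pvMan at *
  omega

lemma pvDf_step (n m : Nat) (p : Nat × Nat) (ps : List (Nat × Nat))
    (hmem : ∀ q ∈ p :: ps, q.1 < n ∧ q.2 < m) (i j : Nat) (hi : i < n) (hj : j < m)
    (h1 : 1 ≤ pvDf p ps i j) :
    ∃ w ∈ pvNbrs n m (i, j), pvDf p ps w.1 w.2 = pvDf p ps i j - 1 := by
  obtain ⟨q, hq, he⟩ := pvDf_attain p ps i j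
  obtain ⟨a, b⟩ := q
  obtain ⟨ha, hb⟩ := hmem (a, b) hq
  have hman : pvMan i j (a, b) = pvDf p ps i j := he.symm
  have hge1 : 1 ≤ pvMan i j (a, b) := by omega
  have hcases : (i < a) ∨ (a < i) ∨ (i = a ∧ j < b) ∨ (i = a ∧ b < j) := by
    unfold pvMan at hge1; simp only at hge1; omega
  have core : ∀ w : Nat × Nat, w ∈ pvNbrs n m (i, j) → pvMan w.1 w.2 (a, b) = pvMan i j (a, b) - 1 →
      pvDf p ps w.1 w.2 = pvDf p ps i j - 1 := by
    intro w hw hval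
    have hle : pvDf p ps w.1 w.2 ≤ pvDf p ps i j - 1 := by
      calc pvDf p ps w.1 w.2 ≤ pvMan w.1 w.2 (a, b) := pvDf_le p ps w.1 w.2 (a, b) hq
        _ = pvDf p ps i j - 1 := by omega
    have hge : pvDf p ps i j ≤ pvDf p ps w.1 w.2 + 1 := by
      have hsym := pvNbrs_symm n m (i, j) w hw hi hj
      exact pvDf_lip n m p ps w (i, j) hsym
    omega
  rcases hcases with hc | hc | ⟨rfl, hc⟩ | ⟨rfl, hc⟩
  · have hw : (i + 1, j) ∈ pvNbrs n m (i, j) := by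
      rw [pvMem_nbrs]
      refine ⟨by omega, hj, by unfold pvMan; simp only; omega⟩
    exact ⟨_, hw, core _ hw (by unfold pvMan; simp only; omega)⟩
  · have hw : (i - 1, j) ∈ pvNbrs n m (i, j) := by
      rw [pvMem_nbrs]
      refine ⟨by omega, hj, by unfold pvMan; simp only; omega⟩
    exact ⟨_, hw, core _ hw (by unfold pvMan; simp only; omega)⟩
  · have hw : (i, j + 1) ∈ pvNbrs n m (i, j) := by
      rw [pvMem_nbrs]
      refine ⟨hi, by omega, by unfold pvMan; simp only; omega⟩
    exact ⟨_, hw, core _ hw (by unfold pvMan; simp only; omega)⟩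
  · have hw : (i, j - 1) ∈ pvNbrs n m (i, j) := by
      rw [pvMem_nbrs]
      refine ⟨hi, by omega, by unfold pvMan; simp only; omega⟩
    exact ⟨_, hw, core _ hw (by unfold pvMan; simp only; omega)⟩
lemma pvDf_zero_of_mem (p : Nat × Nat) (ps : List (Nat × Nat)) (i j : Nat)
    (h : (i, j) ∈ p :: ps) : pvDf p ps i j = 0 := by
  have h1 := pvDf_le p ps i j (i, j) h
  rw [pvMan_self] at h1
  have := pvDf_nonneg p ps i j
  omega

lemma pvDf_mem_of_zero (p : Nat × Nat) (ps : List (Nat × Nat)) (i j : Nat)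
    (h : pvDf p ps i j = 0) : (i, j) ∈ p :: ps := by
  obtain ⟨q, hq, he⟩ := pvDf_attain p ps i j
  have : q = (i, j) := pvMan_eq_zero i j q (by omega)
  rwa [← this]

structure pvStInv (n m : Nat) (D : Nat → Nat → Int) (r : Nat × Nat) (d : Int)
    (st : List (List Int) × List (Nat × Nat)) : Prop where
  dnn : 0 ≤ d
  dims : pvDims n m st.1
  vals : ∀ i j, i < n → j < m → pvGet2 st.1 i j = -1 ∨ pvGet2 st.1 i j = D i j
  comp : ∀ i j, i < n → j < m → D i j ≤ d → pvGet2 st.1 i j ≠ -1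
  rval : r.1 < n ∧ r.2 < m ∧ pvGet2 st.1 r.1 r.2 = D r.1 r.2 ∧ D r.1 r.2 = d
  qmem : ∀ rc ∈ st.2, rc.1 < n ∧ rc.2 < m ∧ pvGet2 st.1 rc.1 rc.2 = D rc.1 rc.2
  qlev : ∀ rc ∈ st.2, d ≤ D rc.1 rc.2 ∧ D rc.1 rc.2 ≤ d + 1
  qsort : (st.2.map (fun rc => D rc.1 rc.2)).Pairwise (· ≤ ·)
  closed : ∀ rc : Nat × Nat, rc.1 < n → rc.2 < m → pvGet2 st.1 rc.1 rc.2 ≠ -1 → rc ∉ st.2 →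
    rc ≠ r → ∀ uv ∈ pvNbrs n m rc, pvGet2 st.1 uv.1 uv.2 ≠ -1

structure pvBfsInv (n m : Nat) (D : Nat → Nat → Int)
    (dist : List (List Int)) (queue : List (Nat × Nat)) : Prop where
  dims : pvDims n m dist
  vals : ∀ i j, i < n → j < m → pvGet2 dist i j = -1 ∨ pvGet2 dist i j = D i j
  qmem : ∀ rc ∈ queue, rc.1 < n ∧ rc.2 < m ∧ pvGet2 dist rc.1 rc.2 = D rc.1 rc.2
  level : ∃ d : Int, 0 ≤ d ∧ (∀ i j, i < n → j < m → D i j ≤ d → pvGet2 dist i j ≠ -1) ∧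
    (∀ rc ∈ queue, d ≤ D rc.1 rc.2 ∧ D rc.1 rc.2 ≤ d + 1) ∧
    (queue.map (fun rc => D rc.1 rc.2)).Pairwise (· ≤ ·)
  closed : ∀ rc : Nat × Nat, rc.1 < n → rc.2 < m → pvGet2 dist rc.1 rc.2 ≠ -1 → rc ∉ queue →
    ∀ uv ∈ pvNbrs n m rc, pvGet2 dist uv.1 uv.2 ≠ -1

lemma pvRelax_eq (n m : Nat) (rc : Nat × Nat) (st : List (List Int) × List (Nat × Nat))
    (d : Int × Int) : pvRelax n m rc st d =
    match pvTgt n m rc d with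
    | none => st
    | some uv =>
      if pvGet2 st.1 uv.1 uv.2 = -1 then
        (pvSet2 st.1 uv.1 uv.2 (pvGet2 st.1 rc.1 rc.2 + 1), st.2 ++ [uv])
      else st := by
  by_cases hc : 0 ≤ (rc.1 : Int) + d.1 ∧ (rc.1 : Int) + d.1 < (n : Int) ∧
      0 ≤ (rc.2 : Int) + d.2 ∧ (rc.2 : Int) + d.2 < (m : Int) <;>
    simp [pvRelax, pvTgt, hc]

lemma pvRelax_pres (n m : Nat) (D : Nat → Nat → Int)
    (hlip : ∀ rc uv, uv ∈ pvNbrs n m rc → D uv.1 uv.2 ≤ D rc.1 rc.2 + 1)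
    (r : Nat × Nat) (d : Int) (st : List (List Int) × List (Nat × Nat))
    (H : pvStInv n m D r d st) (dir : Int × Int) (hdir : dir ∈ pvDirs) :
    pvStInv n m D r d (pvRelax n m r st dir) ∧
    (∀ a b, pvGet2 st.1 a b ≠ -1 → pvGet2 (pvRelax n m r st dir).1 a b ≠ -1) ∧
    (∀ uv, pvTgt n m r dir = some uv → pvGet2 (pvRelax n m r st dir).1 uv.1 uv.2 ≠ -1) ∧
    (pvRelax n m r st dir).2.length + 2 * pvUnset (pvRelax n m r st dir).1 ≤
      st.2.length + 2 * pvUnset st.1 := by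
  rw [pvRelax_eq]
  cases htgt : pvTgt n m r dir with
  | none =>
    refine ⟨H, fun a b h => h, ?_, le_rfl⟩
    intro uv h
    cases h
  | some uv =>
    have huv : uv ∈ pvNbrs n m r := List.mem_filterMap.mpr ⟨dir, hdir, htgt⟩
    obtain ⟨hun, hum, hadj⟩ := (pvMem_nbrs n m r uv).mp huv
    by_cases hset : pvGet2 st.1 uv.1 uv.2 = -1
    · simp only [hset, if_true]
      obtain ⟨hrn, hrm, hrv, hrd⟩ := H.rval
      have hvald : pvGet2 st.1 r.1 r.2 + 1 = d + 1 := by rw [hrv, hrd]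
      have hDuv : D uv.1 uv.2 = d + 1 := by
        have h1 : D uv.1 uv.2 ≤ D r.1 r.2 + 1 := hlip r uv huv
        have h2 : ¬ D uv.1 uv.2 ≤ d := fun hle => H.comp uv.1 uv.2 hun hum hle hset
        omega
      have hself : pvGet2 (pvSet2 st.1 uv.1 uv.2 (pvGet2 st.1 r.1 r.2 + 1)) uv.1 uv.2 = d + 1 := by
        rw [pvGet2_set2_self n m _ _ _ _ H.dims hun hum]; exact hvald
      have hmono : ∀ a b, pvGet2 st.1 a b ≠ -1 →
          pvGet2 (pvSet2 st.1 uv.1 uv.2 (pvGet2 st.1 r.1 r.2 + 1)) a b ≠ -1 := by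
        intro a b hab
        by_cases he : (a, b) = (uv.1, uv.2)
        · obtain ⟨h1, h2⟩ := Prod.mk.injEq .. ▸ he
          subst h1; subst h2
          rw [hself]; have := H.dnn; omega
        · rw [pvGet2_set2_ne _ _ _ _ _ _ he]; exact hab
      have hneq : ∀ a b, pvGet2 st.1 a b ≠ -1 → (a, b) ≠ (uv.1, uv.2) := by
        intro a b hab he
        obtain ⟨h1, h2⟩ := Prod.mk.injEq .. ▸ he
        subst h1; subst h2; exact hab hset
      have hkeep : ∀ a b, pvGet2 st.1 a b ≠ -1 →
          pvGet2 (pvSet2 st.1 uv.1 uv.2 (pvGet2 st.1 r.1 r.2 + 1)) a b = pvGet2 st.1 a b := by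
        intro a b hab
        exact pvGet2_set2_ne _ _ _ _ _ _ (hneq a b hab)
      have hDnn : 0 ≤ d := H.dnn
      refine ⟨?_, hmono, ?_, ?_⟩
      · refine ⟨hDnn, pvDims_set2 n m _ _ _ _ H.dims, ?_, ?_, ?_, ?_, ?_, ?_, ?_⟩
        · -- vals
          intro i j hi hj
          by_cases he : (i, j) = (uv.1, uv.2)
          · obtain ⟨h1, h2⟩ := Prod.mk.injEq .. ▸ he
            subst h1; subst h2
            right; rw [hself, hDuv]
          · rw [pvGet2_set2_ne _ _ _ _ _ _ he]; exact H.vals i j hi hj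
        · -- comp
          intro i j hi hj hle
          exact hmono i j (H.comp i j hi hj hle)
        · -- rval
          have hne : (r.1, r.2) ≠ (uv.1, uv.2) := hneq r.1 r.2 (by rw [hrv, hrd]; omega)
          refine ⟨hrn, hrm, ?_, hrd⟩
          rw [pvGet2_set2_ne _ _ _ _ _ _ hne]; exact hrv
        · -- qmem
          intro rc hrc
          rcases List.mem_append.mp hrc with hold | hnew
          · obtain ⟨h1, h2, h3⟩ := H.qmem rc hold
            refine ⟨h1, h2, ?_⟩
            rw [hkeep rc.1 rc.2 (by rw [h3]; have := H.qlev rc hold; omega)]; exact h3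
          · have : rc = uv := by simpa using hnew
            subst this
            exact ⟨hun, hum, by rw [hself, hDuv]⟩
        · -- qlev
          intro rc hrc
          rcases List.mem_append.mp hrc with hold | hnew
          · exact H.qlev rc hold
          · have : rc = uv := by simpa using hnew
            subst this; rw [hDuv]; omega
        · -- qsort
          rw [List.map_append, List.pairwise_append]
          refine ⟨H.qsort, by simp, ?_⟩
          intro x hx y hy
          simp only [List.map_cons, List.map_nil, List.mem_singleton] at hy
          subst hy
          obtain ⟨rc, hrc, rfl⟩ := List.mem_map.mp hx
          rw [hDuv]
          exact (H.qlev rc hrc).2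
        · -- closed
          intro rc h1 h2 hset' hnotin hner uv' hmem'
          have hni : rc ∉ st.2 := fun h => hnotin (List.mem_append.mpr (Or.inl h))
          have hnu : rc ≠ uv := fun h => hnotin (by subst h; simp)
          have hnu' : (rc.1, rc.2) ≠ (uv.1, uv.2) := by
            intro h
            obtain ⟨ha, hb⟩ := Prod.mk.injEq .. ▸ h
            exact hnu (Prod.ext ha hb)
          rw [pvGet2_set2_ne _ _ _ _ _ _ hnu'] at hset'
          exact hmono uv'.1 uv'.2 (H.closed rc h1 h2 hset' hni hner uv' hmem')
      · -- the target cell ends up discovered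
        intro uv' he
        obtain rfl : uv = uv' := by simpa using he
        rw [hself]; omega
      · -- measure
        have := pvUnset_set2_lt n m st.1 uv.1 uv.2 (pvGet2 st.1 r.1 r.2 + 1)
          H.dims hun hum hset (by omega)
        simp only [List.length_append, List.length_cons, List.length_nil]
        omega
    · -- neighbour already discovered: state unchanged
      simp only [hset, if_false]
      refine ⟨H, fun a b h => h, ?_, by omega⟩
      intro uv' he
      obtain rfl : uv = uv' := by simpa using he
      exact hset

lemma pvFoldRelax (n m : Nat) (D : Nat → Nat → Int)
    (hlip : ∀ rc uv, uv ∈ pvNbrs n m rc → D uv.1 uv.2 ≤ D rc.1 rc.2 + 1)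
    (r : Nat × Nat) (d : Int) :
    ∀ (l : List (Int × Int)), (∀ dir ∈ l, dir ∈ pvDirs) →
    ∀ (st : List (List Int) × List (Nat × Nat)), pvStInv n m D r d st →
    pvStInv n m D r d (l.foldl (pvRelax n m r) st) ∧
    (∀ a b, pvGet2 st.1 a b ≠ -1 → pvGet2 (l.foldl (pvRelax n m r) st).1 a b ≠ -1) ∧
    (∀ dir ∈ l, ∀ uv, pvTgt n m r dir = some uv →
      pvGet2 (l.foldl (pvRelax n m r) st).1 uv.1 uv.2 ≠ -1) ∧
    (l.foldl (pvRelax n m r) st).2.length + 2 * pvUnset (l.foldl (pvRelax n m r) st).1 ≤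
      st.2.length + 2 * pvUnset st.1 := by
  intro l
  induction l with
  | nil => intro _ st H; exact ⟨H, fun a b h => h, by simp, le_rfl⟩
  | cons dir rest ih =>
    intro hl st H
    obtain ⟨H1, hmono1, htgt1, hms1⟩ :=
      pvRelax_pres n m D hlip r d st H dir (hl dir List.mem_cons_self)
    obtain ⟨H2, hmono2, htgt2, hms2⟩ :=
      ih (fun d hd => hl d (List.mem_cons_of_mem _ hd)) (pvRelax n m r st dir) H1
    simp only [List.foldl_cons]
    refine ⟨H2, fun a b h => hmono2 a b (hmono1 a b h), ?_, by omega⟩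
    intro dir' hdir' uv htg
    rcases List.mem_cons.mp hdir' with rfl | hdir'
    · exact hmono2 uv.1 uv.2 (htgt1 uv htg)
    · exact htgt2 dir' hdir' uv htg

lemma pvPopRebase (n m : Nat) (D : Nat → Nat → Int)
    (hnn : ∀ i j, 0 ≤ D i j)
    (hstep : ∀ i j, i < n → j < m → 1 ≤ D i j →
      ∃ w ∈ pvNbrs n m (i, j), D w.1 w.2 = D i j - 1)
    (dist : List (List Int)) (r : Nat × Nat) (rest : List (Nat × Nat))
    (H : pvBfsInv n m D dist (r :: rest)) :
    pvStInv n m D r (D r.1 r.2) (dist, rest) := by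
  obtain ⟨d0, hd0, hcomp0, hqlev0, hqsort0⟩ := H.level
  obtain ⟨hrn, hrm, hrv⟩ := H.qmem r List.mem_cons_self
  obtain ⟨hdr1, hdr2⟩ := hqlev0 r List.mem_cons_self
  have hhead : ∀ rc ∈ rest, D r.1 r.2 ≤ D rc.1 rc.2 := by
    have := hqsort0
    simp only [List.map_cons, List.pairwise_cons] at this
    intro rc hrc
    exact this.1 _ (List.mem_map.mpr ⟨rc, hrc, rfl⟩)
  refine ⟨hnn r.1 r.2, H.dims, H.vals, ?_, ⟨hrn, hrm, hrv, rfl⟩, ?_, ?_, ?_, ?_⟩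
  · -- completeness up to the popped level
    intro i j hi hj hle
    by_cases hle0 : D i j ≤ d0
    · exact hcomp0 i j hi hj hle0
    · -- then D r = d0 + 1 and D i j = d0 + 1: every cell of that level is already discovered
      have hDij : D i j = d0 + 1 := by omega
      have hDr : D r.1 r.2 = d0 + 1 := by omega
      obtain ⟨w, hw, hwval⟩ := hstep i j hi hj (by omega)
      obtain ⟨hwn, hwm, _⟩ := (pvMem_nbrs n m (i, j) w).mp hw
      have hwset : pvGet2 dist w.1 w.2 ≠ -1 := hcomp0 w.1 w.2 hwn hwm (by omega)
      have hwq : w ∉ r :: rest := by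
        intro hwq
        rcases List.mem_cons.mp hwq with rfl | hwq
        · omega
        · have := hhead w hwq; omega
      have hsym := pvNbrs_symm n m (i, j) w hw hi hj
      exact H.closed w hwn hwm hwset hwq (i, j) hsym
  · -- qmem
    intro rc hrc; exact H.qmem rc (List.mem_cons_of_mem _ hrc)
  · -- qlev
    intro rc hrc
    refine ⟨hhead rc hrc, ?_⟩
    have := (hqlev0 rc (List.mem_cons_of_mem _ hrc)).2
    omega
  · -- qsort
    have := hqsort0
    simp only [List.map_cons, List.pairwise_cons] at this
    exact this.2
  · -- closed
    intro rc h1 h2 hset hnotin hner uv hmem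
    have : rc ∉ r :: rest := by
      intro hh
      rcases List.mem_cons.mp hh with rfl | hh
      · exact hner rfl
      · exact hnotin hh
    exact H.closed rc h1 h2 hset this uv hmem

lemma pvStepInv (n m : Nat) (D : Nat → Nat → Int)
    (hlip : ∀ rc uv, uv ∈ pvNbrs n m rc → D uv.1 uv.2 ≤ D rc.1 rc.2 + 1)
    (hnn : ∀ i j, 0 ≤ D i j)
    (hstep : ∀ i j, i < n → j < m → 1 ≤ D i j →
      ∃ w ∈ pvNbrs n m (i, j), D w.1 w.2 = D i j - 1)
    (dist : List (List Int)) (r : Nat × Nat) (rest : List (Nat × Nat))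
    (H : pvBfsInv n m D dist (r :: rest)) :
    pvBfsInv n m D (pvDirs.foldl (pvRelax n m r) (dist, rest)).1
      (pvDirs.foldl (pvRelax n m r) (dist, rest)).2 ∧
    (pvDirs.foldl (pvRelax n m r) (dist, rest)).2.length +
        2 * pvUnset (pvDirs.foldl (pvRelax n m r) (dist, rest)).1 <
      (r :: rest).length + 2 * pvUnset dist := by
  have Hst := pvPopRebase n m D hnn hstep dist r rest H
  obtain ⟨Hst', hmono, htgt, hms⟩ :=
    pvFoldRelax n m D hlip r (D r.1 r.2) pvDirs (fun d hd => hd) (dist, rest) Hst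
  constructor
  · refine ⟨Hst'.dims, Hst'.vals, Hst'.qmem, ⟨D r.1 r.2, Hst'.dnn, Hst'.comp, Hst'.qlev, Hst'.qsort⟩, ?_⟩
    intro rc h1 h2 hset hnotin uv hmem
    by_cases hner : rc = r
    · subst hner
      obtain ⟨dir, hdir, htg⟩ := List.mem_filterMap.mp hmem
      exact htgt dir hdir uv htg
    · exact Hst'.closed rc h1 h2 hset hnotin hner uv hmem
  · have hms' : (pvDirs.foldl (pvRelax n m r) (dist, rest)).2.length +
        2 * pvUnset (pvDirs.foldl (pvRelax n m r) (dist, rest)).1 ≤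
        rest.length + 2 * pvUnset dist := hms
    simp only [List.length_cons]
    omega

lemma pvComplete (n m : Nat) (D : Nat → Nat → Int)
    (hstep : ∀ i j, i < n → j < m → 1 ≤ D i j →
      ∃ w ∈ pvNbrs n m (i, j), D w.1 w.2 = D i j - 1)
    (dist : List (List Int)) (H : pvBfsInv n m D dist []) :
    ∀ i j, i < n → j < m → pvGet2 dist i j ≠ -1 := by
  obtain ⟨d0, hd0, hcomp0, _, _⟩ := H.level
  suffices h : ∀ k i j, i < n → j < m → (D i j).toNat = k → pvGet2 dist i j ≠ -1 by
    intro i j hi hj; exact h (D i j).toNat i j hi hj rfl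
  intro k
  induction k using Nat.strong_induction_on with
  | _ k ih =>
    intro i j hi hj hk
    by_cases h0 : D i j ≤ d0
    · exact hcomp0 i j hi hj h0
    · have h1 : 1 ≤ D i j := by omega
      obtain ⟨w, hw, hwval⟩ := hstep i j hi hj h1
      obtain ⟨hwn, hwm, _⟩ := (pvMem_nbrs n m (i, j) w).mp hw
      have hwset : pvGet2 dist w.1 w.2 ≠ -1 := by
        refine ih (D w.1 w.2).toNat (by omega) w.1 w.2 hwn hwm rfl
      have hsym := pvNbrs_symm n m (i, j) w hw hi hj
      exact H.closed w hwn hwm hwset (by simp) (i, j) hsym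

lemma pvBfsMain (n m : Nat) (D : Nat → Nat → Int)
    (hlip : ∀ rc uv, uv ∈ pvNbrs n m rc → D uv.1 uv.2 ≤ D rc.1 rc.2 + 1)
    (hnn : ∀ i j, 0 ≤ D i j)
    (hstep : ∀ i j, i < n → j < m → 1 ≤ D i j →
      ∃ w ∈ pvNbrs n m (i, j), D w.1 w.2 = D i j - 1) :
    ∀ (fuel : Nat) (dist : List (List Int)) (queue : List (Nat × Nat)),
    pvBfsInv n m D dist queue → queue.length + 2 * pvUnset dist < fuel →
    ∀ i j, i < n → j < m → pvGet2 (pvBfs n m fuel (dist, queue)) i j = D i j := by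
  intro fuel
  induction fuel with
  | zero => intro dist queue _ hm; omega
  | succ fuel ih =>
    intro dist queue H hm i j hi hj
    cases queue with
    | nil =>
      have hset := pvComplete n m D hstep dist H i j hi hj
      rcases H.vals i j hi hj with h | h
      · exact absurd h hset
      · simpa [pvBfs] using h
    | cons r rest =>
      obtain ⟨H', hm'⟩ := pvStepInv n m D hlip hnn hstep dist r rest H
      have : pvBfs n m (fuel + 1) (dist, r :: rest) =
          pvBfs n m fuel (pvDirs.foldl (pvRelax n m r) (dist, rest)) := rfl
      rw [this]
      have := ih (pvDirs.foldl (pvRelax n m r) (dist, rest)).1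
        (pvDirs.foldl (pvRelax n m r) (dist, rest)).2 H' (by
          simp only [List.length_cons] at hm hm'
          omega)
        i j hi hj
      simpa using this

lemma pvRelax_dims (n m : Nat) (r : Nat × Nat) (st : List (List Int) × List (Nat × Nat))
    (dir : Int × Int) (hd : pvDims n m st.1) : pvDims n m (pvRelax n m r st dir).1 := by
  rw [pvRelax_eq]
  cases pvTgt n m r dir with
  | none => exact hd
  | some uv =>
    by_cases hset : pvGet2 st.1 uv.1 uv.2 = -1
    · simp only [hset, if_true]
      exact pvDims_set2 n m _ _ _ _ hd
    · simpa [hset] using hd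

lemma pvBfs_dims (n m : Nat) : ∀ (fuel : Nat) (st : List (List Int) × List (Nat × Nat)),
    pvDims n m st.1 → pvDims n m (pvBfs n m fuel st) := by
  intro fuel
  induction fuel with
  | zero => intro st h; exact h
  | succ fuel ih =>
    intro st h
    cases hq : st.2 with
    | nil =>
      obtain ⟨d, q⟩ := st
      simp only at hq
      subst hq
      simpa [pvBfs] using h
    | cons r rest =>
      obtain ⟨d, q⟩ := st
      simp only at hq
      subst hq
      show pvDims n m (pvBfs n m fuel (pvDirs.foldl (pvRelax n m r) (d, rest)))
      apply ih
      have : ∀ (l : List (Int × Int)) (st' : List (List Int) × List (Nat × Nat)),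
          pvDims n m st'.1 → pvDims n m (l.foldl (pvRelax n m r) st').1 := by
        intro l
        induction l with
        | nil => intro st' h'; exact h'
        | cons dir ds ihd =>
          intro st' h'
          exact ihd _ (pvRelax_dims n m r st' dir h')
      exact this pvDirs (d, rest) h

lemma pvBfs_queue_nil (n m : Nat) : ∀ (fuel : Nat) (dist : List (List Int)),
    pvBfs n m fuel (dist, []) = dist := by
  intro fuel dist
  cases fuel with
  | zero => rfl
  | succ fuel => rfl

lemma pvInnerQ (grid : List (List Int)) (i : Nat) :
    ∀ (mm : Nat) (st : List (List Int) × List (Nat × Nat)),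
    ((List.range mm).foldl (fun st j =>
      if pvGet2 grid i j = 1 then (pvSet2 st.1 i j 0, st.2 ++ [(i, j)]) else st) st).2 =
    st.2 ++ (List.range mm).filterMap (fun j =>
      if pvGet2 grid i j = 1 then some (i, j) else none) := by
  intro mm
  induction mm with
  | zero => intro st; simp
  | succ mm ih =>
    intro st
    rw [List.range_succ, List.foldl_append]
    simp only [List.foldl_cons, List.foldl_nil]
    by_cases hc : pvGet2 grid i mm = 1 <;>
      simp [hc, ih st, List.filterMap_append]

lemma pvInnerD (grid : List (List Int)) (n m i : Nat) (hi : i < n) :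
    ∀ (mm : Nat), mm ≤ m → ∀ (st : List (List Int) × List (Nat × Nat)), pvDims n m st.1 →
    pvDims n m ((List.range mm).foldl (fun st j =>
      if pvGet2 grid i j = 1 then (pvSet2 st.1 i j 0, st.2 ++ [(i, j)]) else st) st).1 ∧
    ∀ a b, a < n → b < m →
      pvGet2 ((List.range mm).foldl (fun st j =>
        if pvGet2 grid i j = 1 then (pvSet2 st.1 i j 0, st.2 ++ [(i, j)]) else st) st).1 a b =
      if a = i ∧ b < mm ∧ pvGet2 grid i b = 1 then 0 else pvGet2 st.1 a b := by
  intro mm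
  induction mm with
  | zero =>
    intro _ st hd
    refine ⟨hd, ?_⟩
    intro a b _ _
    simp
  | succ mm ih =>
    intro hmm st hd
    obtain ⟨ihd, ihv⟩ := ih (by omega) st hd
    rw [List.range_succ, List.foldl_append]
    by_cases hc : pvGet2 grid i mm = 1
    · simp only [List.foldl_cons, List.foldl_nil, hc, if_true]
      refine ⟨pvDims_set2 n m _ _ _ _ ihd, ?_⟩
      intro a b ha hb
      by_cases he : (a, b) = (i, mm)
      · obtain ⟨h1, h2⟩ := Prod.mk.injEq .. ▸ he
        subst h1; subst h2
        rw [pvGet2_set2_self n m _ _ _ _ ihd hi (by omega)]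
        rw [if_pos ⟨rfl, by omega, hc⟩]
      · rw [pvGet2_set2_ne _ _ _ _ _ _ he, ihv a b ha hb]
        have hne : ¬(a = i ∧ b = mm) := by
          intro ⟨h1, h2⟩; exact he (by rw [h1, h2])
        by_cases h1 : a = i ∧ b < mm ∧ pvGet2 grid i b = 1
        · rw [if_pos h1, if_pos ⟨h1.1, by omega, h1.2.2⟩]
        · rw [if_neg h1, if_neg ?_]
          intro ⟨g1, g2, g3⟩
          have : b ≠ mm := fun hh => hne ⟨g1, hh⟩
          exact h1 ⟨g1, by omega, g3⟩
    · simp only [List.foldl_cons, List.foldl_nil, hc, if_false]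
      refine ⟨ihd, ?_⟩
      intro a b ha hb
      rw [ihv a b ha hb]
      by_cases h1 : a = i ∧ b < mm ∧ pvGet2 grid i b = 1
      · rw [if_pos h1, if_pos ⟨h1.1, by omega, h1.2.2⟩]
      · rw [if_neg h1, if_neg ?_]
        intro ⟨g1, g2, g3⟩
        have : b ≠ mm := by
          intro hh; subst hh; subst g1; exact hc g3
        exact h1 ⟨g1, by omega, g3⟩

lemma pvBaseDims (n m : Nat) : pvDims n m (List.replicate n (List.replicate m (-1 : Int))) := by
  refine ⟨by simp, ?_⟩
  intro k hk
  simp [List.getD, hk]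

lemma pvBaseGet (n m a b : Nat) (ha : a < n) (hb : b < m) :
    pvGet2 (List.replicate n (List.replicate m (-1 : Int))) a b = -1 := by
  simp [pvGet2, List.getD, ha, hb]

lemma pvInitChar (grid : List (List Int)) (n m : Nat) :
    pvDims n m (pvInit grid n m).1 ∧
    (pvInit grid n m).2 = pvOnes grid n m ∧
    ∀ a b, a < n → b < m →
      pvGet2 (pvInit grid n m).1 a b = if pvGet2 grid a b = 1 then 0 else -1 := by
  suffices h : ∀ (nn : Nat), nn ≤ n →
      ∀ (st : List (List Int) × List (Nat × Nat)), pvDims n m st.1 →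
      pvDims n m ((List.range nn).foldl (fun st i =>
        (List.range m).foldl (fun st j =>
          if pvGet2 grid i j = 1 then (pvSet2 st.1 i j 0, st.2 ++ [(i, j)]) else st) st) st).1 ∧
      ((List.range nn).foldl (fun st i =>
        (List.range m).foldl (fun st j =>
          if pvGet2 grid i j = 1 then (pvSet2 st.1 i j 0, st.2 ++ [(i, j)]) else st) st) st).2 =
        st.2 ++ (List.range nn).flatMap (fun i => (List.range m).filterMap (fun j =>
          if pvGet2 grid i j = 1 then some (i, j) else none)) ∧
      ∀ a b, a < n → b < m →
        pvGet2 ((List.range nn).foldl (fun st i =>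
          (List.range m).foldl (fun st j =>
            if pvGet2 grid i j = 1 then (pvSet2 st.1 i j 0, st.2 ++ [(i, j)]) else st) st) st).1 a b =
        if a < nn ∧ pvGet2 grid a b = 1 then 0 else pvGet2 st.1 a b by
    obtain ⟨h1, h2, h3⟩ := h n le_rfl (List.replicate n (List.replicate m (-1)), []) (pvBaseDims n m)
    refine ⟨h1, by simpa [pvOnes] using h2, ?_⟩
    intro a b ha hb
    rw [pvInit, h3 a b ha hb, pvBaseGet n m a b ha hb]
    by_cases hc : pvGet2 grid a b = 1
    · rw [if_pos ⟨ha, hc⟩, if_pos hc]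
    · rw [if_neg (fun hh => hc hh.2), if_neg hc]
  intro nn
  induction nn with
  | zero =>
    intro _ st hd
    refine ⟨hd, by simp, ?_⟩
    intro a b _ _
    simp
  | succ nn ih =>
    intro hnn st hd
    obtain ⟨ihd, ihq, ihv⟩ := ih (by omega) st hd
    rw [List.range_succ, List.foldl_append, List.flatMap_append]
    obtain ⟨jd, jv⟩ := pvInnerD grid n m nn (by omega) m le_rfl _ ihd
    refine ⟨by simpa using jd, ?_, ?_⟩
    · simp only [List.foldl_cons, List.foldl_nil]
      rw [pvInnerQ, ihq]
      simp
    · intro a b ha hb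
      simp only [List.foldl_cons, List.foldl_nil]
      rw [jv a b ha hb, ihv a b ha hb]
      by_cases h1 : a = nn ∧ b < m ∧ pvGet2 grid nn b = 1
      · obtain ⟨rfl, hbm, h13⟩ := h1
        rw [if_pos ⟨rfl, hbm, h13⟩, if_pos ⟨by omega, h13⟩]
      · by_cases h2 : a < nn ∧ pvGet2 grid a b = 1
        · rw [if_neg h1, if_pos h2, if_pos ⟨by omega, h2.2⟩]
        · rw [if_neg h1, if_neg h2, if_neg ?_]
          intro ⟨g1, g2⟩
          rcases Nat.lt_succ_iff_lt_or_eq.mp g1 with hlt | rfl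
          · exact h2 ⟨hlt, g2⟩
          · exact h1 ⟨rfl, hb, g2⟩

lemma pvLGetD_eq {α : Type} (l : List α) (i : Nat) (d : α) (h : i < l.length) :
    l.getD i d = l[i] := by
  simp [List.getD, List.getElem?_eq_getElem h]

lemma pvGet2_elem (xs : List (List Int)) (i j : Nat) (h1 : i < xs.length)
    (h2 : j < (xs[i]).length) : pvGet2 xs i j = xs[i][j] := by
  unfold pvGet2
  rw [pvLGetD_eq xs i [] h1, pvLGetD_eq _ j 0 h2]

lemma pvEqOfGet (n m : Nat) (xs ys : List (List Int)) (hx : pvDims n m xs) (hy : pvDims n m ys)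
    (h : ∀ i j, i < n → j < m → pvGet2 xs i j = pvGet2 ys i j) : xs = ys := by
  obtain ⟨hxl, hxr⟩ := hx
  obtain ⟨hyl, hyr⟩ := hy
  apply List.ext_getElem (by omega)
  intro i h1 h2
  have hxi : (xs[i]).length = m := by
    have := hxr i (by omega)
    rwa [List.getD, List.getElem?_eq_getElem h1, Option.getD_some] at this
  have hyi : (ys[i]).length = m := by
    have := hyr i (by omega)
    rwa [List.getD, List.getElem?_eq_getElem h2, Option.getD_some] at this
  apply List.ext_getElem (by omega)
  intro j g1 g2
  have e1 := pvGet2_elem xs i j h1 g1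
  have e2 := pvGet2_elem ys i j h2 g2
  rw [← e1, ← e2]
  exact h i j (by omega) (by omega)

lemma pvTabDims (n m : Nat) (f : Nat → Nat → Int) :
    pvDims n m ((List.range n).map fun i => (List.range m).map fun j => f i j) := by
  refine ⟨by simp, ?_⟩
  intro k hk
  rw [pvLGetD_eq _ k [] (by simpa using hk)]
  simp

lemma pvTabGet (n m : Nat) (f : Nat → Nat → Int) (a b : Nat) (ha : a < n) (hb : b < m) :
    pvGet2 ((List.range n).map fun i => (List.range m).map fun j => f i j) a b = f a b := by
  unfold pvGet2
  rw [pvLGetD_eq _ a [] (by simpa using ha)]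
  rw [List.getElem_map, List.getElem_range]
  rw [pvLGetD_eq _ b 0 (by simpa using hb)]
  rw [List.getElem_map, List.getElem_range]

lemma pvMainAux (grid : List (List Int)) (n m : Nat) :
    pvBfs n m ((pvInit grid n m).2.length + 2 * (n * m) + 1) (pvInit grid n m) =
    (match pvOnes grid n m with
     | [] => List.replicate n (List.replicate m (-1))
     | p :: ps => (List.range n).map (fun i => (List.range m).map fun j => pvDf p ps i j)) := by
  obtain ⟨hdim, hq, hv⟩ := pvInitChar grid n m
  cases hones : pvOnes grid n m with
  | nil =>
    have h2q : (pvInit grid n m).2 = [] := by rw [hq, hones]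
    have hpair : pvInit grid n m = ((pvInit grid n m).1, []) := by rw [← h2q]
    rw [hpair, pvBfs_queue_nil]
    apply pvEqOfGet n m _ _ hdim (pvBaseDims n m)
    intro i j hi hj
    have hno : pvGet2 grid i j ≠ 1 := by
      intro hc
      have : (i, j) ∈ pvOnes grid n m := (pvMem_ones grid n m i j).mpr ⟨hi, hj, hc⟩
      rw [hones] at this
      simp at this
    rw [hv i j hi hj, if_neg hno, pvBaseGet n m i j hi hj]
  | cons p ps =>
    have hmem : ∀ q ∈ p :: ps, q.1 < n ∧ q.2 < m := by
      intro q hqm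
      have hmo : q ∈ pvOnes grid n m := by rw [hones]; exact hqm
      obtain ⟨a, b⟩ := q
      obtain ⟨h1, h2, _⟩ := (pvMem_ones grid n m a b).mp hmo
      exact ⟨h1, h2⟩
    have honesmem : ∀ a b : Nat, (a, b) ∈ p :: ps ↔ a < n ∧ b < m ∧ pvGet2 grid a b = 1 := by
      intro a b
      rw [← hones]
      exact pvMem_ones grid n m a b
    have hlip' : ∀ rc uv, uv ∈ pvNbrs n m rc →
        pvDf p ps uv.1 uv.2 ≤ pvDf p ps rc.1 rc.2 + 1 := fun rc uv h => pvDf_lip n m p ps rc uv h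
    have hnn' : ∀ i j, 0 ≤ pvDf p ps i j := fun i j => pvDf_nonneg p ps i j
    have hstep' : ∀ i j, i < n → j < m → 1 ≤ pvDf p ps i j →
        ∃ w ∈ pvNbrs n m (i, j), pvDf p ps w.1 w.2 = pvDf p ps i j - 1 :=
      fun i j hi hj h1 => pvDf_step n m p ps hmem i j hi hj h1
    have hqueue : (pvInit grid n m).2 = p :: ps := by rw [hq, hones]
    have H0 : pvBfsInv n m (pvDf p ps) (pvInit grid n m).1 (p :: ps) := by
      refine ⟨hdim, ?_, ?_, ⟨0, le_rfl, ?_, ?_, ?_⟩, ?_⟩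
      · -- vals
        intro i j hi hj
        rw [hv i j hi hj]
        by_cases hc : pvGet2 grid i j = 1
        · right
          rw [if_pos hc, pvDf_zero_of_mem p ps i j ((honesmem i j).mpr ⟨hi, hj, hc⟩)]
        · left; rw [if_neg hc]
      · -- qmem
        intro rc hrc
        have hm0 : (rc.1, rc.2) ∈ p :: ps := by simpa using hrc
        obtain ⟨h1, h2, h3⟩ := (honesmem rc.1 rc.2).mp hm0
        refine ⟨h1, h2, ?_⟩
        rw [hv rc.1 rc.2 h1 h2, if_pos h3, pvDf_zero_of_mem p ps rc.1 rc.2 hm0]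
      · -- comp at level 0
        intro i j hi hj hle
        have h0 : pvDf p ps i j = 0 := by have := hnn' i j; omega
        obtain ⟨_, _, h3⟩ := (honesmem i j).mp (pvDf_mem_of_zero p ps i j h0)
        rw [hv i j hi hj, if_pos h3]
        omega
      · -- qlev at level 0
        intro rc hrc
        have hm0 : (rc.1, rc.2) ∈ p :: ps := by simpa using hrc
        rw [pvDf_zero_of_mem p ps rc.1 rc.2 hm0]
        omega
      · -- qsort: all queued cells are sources at distance 0
        apply List.pairwise_of_forall_mem_list
        intro x hx y hy
        obtain ⟨a, ham, rfl⟩ := List.mem_map.mp hx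
        obtain ⟨b, hbm, rfl⟩ := List.mem_map.mp hy
        rw [pvDf_zero_of_mem p ps a.1 a.2 (by simpa using ham),
          pvDf_zero_of_mem p ps b.1 b.2 (by simpa using hbm)]
      · -- closed: vacuous, every discovered cell is queued
        intro rc h1 h2 hset hnotin uv hmem0
        exfalso
        rw [hv rc.1 rc.2 h1 h2] at hset
        by_cases hc : pvGet2 grid rc.1 rc.2 = 1
        · exact hnotin (by simpa using (honesmem rc.1 rc.2).mpr ⟨h1, h2, hc⟩)
        · rw [if_neg hc] at hset; exact hset rfl
    have hpair : pvInit grid n m = ((pvInit grid n m).1, p :: ps) := by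
      rw [← hqueue]
    have hfuel : (p :: ps).length + 2 * pvUnset (pvInit grid n m).1 <
        (pvInit grid n m).2.length + 2 * (n * m) + 1 := by
      have := pvUnset_le n m (pvInit grid n m).1 hdim
      rw [hqueue]
      omega
    have hpoint := pvBfsMain n m (pvDf p ps) hlip' hnn' hstep'
      ((pvInit grid n m).2.length + 2 * (n * m) + 1) (pvInit grid n m).1 (p :: ps) H0 hfuel
    have hdims' : pvDims n m (pvBfs n m ((pvInit grid n m).2.length + 2 * (n * m) + 1)
        (pvInit grid n m)) := pvBfs_dims n m _ _ hdim
    rw [hpair]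
    apply pvEqOfGet n m _ _ (by rw [← hpair]; exact hdims') (pvTabDims n m _)
    intro i j hi hj
    rw [pvTabGet n m _ i j hi hj]
    have := hpoint i j hi hj
    rw [hpair] at this
    exact this

theorem nearest_one_distance_main (grid : List (List Int)) :
    nearest_one_distance grid = nearest_one_distance_alt grid :=
  pvMainAux grid grid.length grid.headI.length

-- ===== VERDICT (by name: the statement is the Claim_ definition above) =====
theorem nearest_one_distance_spec : Claim_equal_nearest_one_distance := by
  intro grid _ _
  unfold Spec_nearest_one_distance
  exact nearest_one_distance_main grid
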